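-- pv_equiv track=rewrite | github.com/Aremeer/Start | cs50python/Week 3 problem/simpleGrocey.py | asignItems
-- ===== SOURCE A (Python) =====
-- def asignItems(items):
--     asignedItems = list()
--     for item in items:
--         count = items.count(item)
--         asignedItems.append(f"{count} {item}")
--         if asignedItems.count(f"{count} {item}") >= 2:
--             del asignedItems[asignedItems.index(f"{count} {item}")]
--     return asignedItems
-- ===== SOURCE B (Python) =====
-- def asignItems(items):
--     counts = {}
--     for item in items:
--         counts[item] = counts.get(item, 0) + 1
--     result = []
--     seen = set()
--     for item in reversed(items):
--         s = f"{counts[item]} {item}"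
--         if s not in seen:
--             seen.add(s)
--             result.append(s)
--     result.reverse()
--     return result
-- ===== Notes on version B (the rewrite author's own statement) =====
-- stated objective: faster
-- what changed: Replaces A's quadratic append-then-delete-duplicate loop (items.count, list.count and list.index rescans per element) with one counting pass over a dict followed by one reversed pass deduplicating via a seen-set, then a final reverse.
import Mathlib
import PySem

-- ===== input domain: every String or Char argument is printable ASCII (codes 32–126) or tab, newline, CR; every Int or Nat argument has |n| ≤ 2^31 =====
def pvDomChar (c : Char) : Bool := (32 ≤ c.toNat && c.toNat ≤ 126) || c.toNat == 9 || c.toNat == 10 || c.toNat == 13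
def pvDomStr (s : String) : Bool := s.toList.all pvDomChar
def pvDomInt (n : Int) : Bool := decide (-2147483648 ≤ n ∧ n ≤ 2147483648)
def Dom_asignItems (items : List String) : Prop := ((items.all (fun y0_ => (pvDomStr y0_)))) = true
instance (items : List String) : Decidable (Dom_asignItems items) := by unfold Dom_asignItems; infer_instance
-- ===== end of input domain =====

-- B replaces A's quadratic append-then-delete loop by one dict counting pass plus one
-- reversed seen-set dedup pass (faster); return values agree on all inputs.

-- ===== PORT A =====
def asignItems (items : List String) : List String :=
  items.foldl (fun asignedItems item =>
    let count : Int := (PySem.List.count items item : Int)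
    let s : String := PySem.Int.toStr count ++ " " ++ item          -- f"{count} {item}"
    let asignedItems := asignedItems ++ [s]
    if 2 ≤ PySem.List.count asignedItems s then
      match PySem.List.index? asignedItems s with                    -- del asignedItems[asignedItems.index(s)]
      | some i => asignedItems.eraseIdx i
      | none => asignedItems                                         -- unreachable: count ≥ 2 ⇒ s present
    else asignedItems) []

-- ===== PORT B =====
def asignItems_alt (items : List String) : List String :=
  let counts : PySem.Dict String Int :=
    items.foldl (fun d x => d.insert x (d.getD x 0 + 1)) PySem.Dict.empty
  let p : PySem.Set String × List String :=
    items.reverse.foldl (fun (p : PySem.Set String × List String) item =>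
      let s : String := PySem.Int.toStr (counts.getD item 0) ++ " " ++ item
      if PySem.Set.contains p.1 s then p
      else (PySem.Set.add p.1 s, p.2 ++ [s])) (PySem.Set.empty, [])
  p.2.reverse

-- ===== PRECONDITION & SPEC =====
def Spec_asignItems (items : List String) (out : List String) : Prop := out = asignItems_alt items
instance (items : List String) (out : List String) : Decidable (Spec_asignItems items out) := by unfold Spec_asignItems; infer_instance

-- ===== CLAIM (what is proved, stated in full; the proofs are below) =====
def Claim_equal_asignItems : Prop := ∀ (items : List String), Dom_asignItems items → Spec_asignItems items (asignItems items)

-- ===== LEMMAS AND PROOFS =====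

-- the string both programs build for an element
def fstr (items : List String) (x : String) : String :=
  PySem.Int.toStr ((PySem.List.count items x : Int)) ++ " " ++ x

-- "last-occurrence dedup": the common specification of both loops
def ld : List String → List String
  | [] => []
  | a :: l => if a ∈ l then ld l else a :: ld l

-- "first-occurrence dedup"
def fd : List String → List String
  | [] => []
  | a :: l => a :: (fd l).filter (fun x => x ≠ a)

-- A's loop body, on the already-built string
def stepA (acc : List String) (s : String) : List String :=
  let acc' := acc ++ [s]
  if 2 ≤ PySem.List.count acc' s then
    match PySem.List.index? acc' s with
    | some i => acc'.eraseIdx i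
    | none => acc'
  else acc'

-- B's loop body, on the already-built string
def stepB (p : PySem.Set String × List String) (s : String) : PySem.Set String × List String :=
  if PySem.Set.contains p.1 s then p else (PySem.Set.add p.1 s, p.2 ++ [s])

theorem ld_of_nodup : ∀ {l : List String}, l.Nodup → ld l = l := by
  intro l h
  induction l with
  | nil => rfl
  | cons a t ih =>
    rcases List.nodup_cons.mp h with ⟨ha, ht⟩
    simp [ld, ha, ih ht]

theorem ld_erase (s : String) (r : List String) (hs : s ∈ r) :
    ∀ acc : List String, ld (acc.erase s ++ r) = ld (acc ++ r) := by
  intro acc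
  induction acc with
  | nil => simp
  | cons a t ih =>
    by_cases has : a = s
    · subst has
      simp [List.erase_cons_head, ld, List.mem_append, hs]
    · rw [List.erase_cons_tail (by simpa using has)]
      simp only [List.cons_append, ld, List.mem_append,
        List.mem_erase_of_ne has, ih]

theorem stepA_eq (acc : List String) (s : String) (h : acc.Nodup) :
    stepA acc s = if s ∈ acc then acc.erase s ++ [s] else acc ++ [s] := by
  by_cases hs : s ∈ acc
  · have hc : PySem.List.count (acc ++ [s]) s = 2 := by
      simp [PySem.List.count_eq, List.count_append,
        List.count_eq_one_of_mem h hs]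
    have hidx : PySem.List.index? (acc ++ [s]) s = PySem.List.index? acc s := by
      simpa using PySem.List.index?_append_of_mem (t := [s]) hs
    have hsome : (PySem.List.index? acc s).isSome := by
      rw [PySem.List.index?_isSome_iff]; exact hs
    rcases Option.isSome_iff_exists.mp hsome with ⟨k, hk⟩
    rcases (PySem.List.index?_eq_some_iff _ _ _).mp hk with ⟨pre, suf, hacc, hlen, hpre⟩
    have herase : acc.erase s = pre ++ suf := by
      rw [hacc, List.erase_append_right _ hpre, List.erase_cons_head]
    have heidx : (acc ++ [s]).eraseIdx k = pre ++ suf ++ [s] := by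
      subst hacc hlen
      rw [List.append_assoc, List.cons_append,
        List.eraseIdx_append_of_length_le (Nat.le_refl pre.length)]
      simp
    simp only [stepA, hc, hidx, hk]
    simp [hs, herase, heidx]
  · have hc : PySem.List.count (acc ++ [s]) s = 1 := by
      simp [PySem.List.count_eq, List.count_append, List.count_eq_zero.mpr hs]
    simp [stepA, hc, hs]

theorem foldl_stepA : ∀ (L : List String) (acc : List String), acc.Nodup →
    L.foldl stepA acc = ld (acc ++ L) := by
  intro L
  induction L with
  | nil => intro acc h; simp [ld_of_nodup h]
  | cons s L ih =>
    intro acc h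
    rw [List.foldl_cons, stepA_eq acc s h]
    by_cases hs : s ∈ acc
    · have h1 : (acc.erase s ++ [s]).Nodup := by
        refine List.Nodup.append (h.erase s) (List.nodup_singleton s) ?_
        intro a hma hmb
        rcases List.mem_singleton.mp hmb with rfl
        exact ((List.Nodup.mem_erase_iff h).mp hma).1 rfl
      rw [if_pos hs, ih _ h1, List.append_assoc, List.singleton_append,
        ld_erase s (s :: L) (by simp) acc]
    · have h1 : (acc ++ [s]).Nodup := by
        refine List.Nodup.append h (List.nodup_singleton s) ?_
        intro a hma hmb
        rcases List.mem_singleton.mp hmb with rfl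
        exact hs hma
      rw [if_neg hs, ih _ h1, List.append_assoc, List.singleton_append]

theorem ld_append_singleton (l : List String) (a : String) :
    ld (l ++ [a]) = (ld l).filter (fun x => x ≠ a) ++ [a] := by
  induction l with
  | nil => simp [ld]
  | cons b l ih =>
    by_cases hba : b = a
    · subst hba
      have hb : b ∈ l ++ [b] := by simp
      simp only [List.cons_append, ld, hb, if_true, ih]
      by_cases hbl : b ∈ l <;> simp [hbl]
    · simp only [List.cons_append, ld, List.mem_append, List.mem_singleton, hba,
        or_false, ih]
      by_cases hbl : b ∈ l <;> simp [hbl, hba]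

theorem fd_rev : ∀ N : List String, fd N = (ld N.reverse).reverse := by
  intro N
  induction N with
  | nil => rfl
  | cons a N ih =>
    simp only [fd, List.reverse_cons, ld_append_singleton, List.reverse_append,
      List.reverse_cons, List.reverse_nil, List.nil_append, List.singleton_append,
      ← List.filter_reverse, ← ih]

theorem foldl_stepB : ∀ (M : List String) (seen : PySem.Set String) (res : List String),
    (∀ x, x ∈ seen ↔ x ∈ res) →
    (M.foldl stepB (seen, res)).2 = res ++ (fd M).filter (fun x => decide (x ∉ res)) := by
  intro M
  induction M with
  | nil => intro seen res _; simp [fd]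
  | cons a M ih =>
    intro seen res hinv
    by_cases ha : a ∈ res
    · rw [List.foldl_cons, show stepB (seen, res) a = (seen, res) from by
        simp [stepB, hinv, ha], ih seen res hinv]
      have hfa : ∀ x ∈ fd M, (!decide (x ∈ res) && !decide (x = a)) = !decide (x ∈ res) := by
        intro x _
        by_cases hxa : x = a
        · subst hxa; simp [ha]
        · simp [hxa]
      simp only [fd, List.filter_cons, decide_not, ha, decide_true, Bool.not_true,
        Bool.false_eq_true, if_false, List.filter_filter, List.filter_congr hfa]
    · have hinv' : ∀ x, x ∈ PySem.Set.add seen a ↔ x ∈ res ++ [a] := by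
        intro x
        rw [PySem.Set.mem_add]
        simp [hinv x, or_comm]
      rw [List.foldl_cons, show stepB (seen, res) a = (PySem.Set.add seen a, res ++ [a]) from by
        simp [stepB, hinv, ha], ih _ _ hinv']
      have hflt : ∀ x ∈ fd M,
          decide (x ∉ res ++ [a]) = (decide (x ≠ a) && decide (x ∉ res)) := by
        intro x _
        by_cases hxa : x = a <;> by_cases hxr : x ∈ res <;> simp [hxa, hxr]
      rw [List.filter_congr hflt]
      have hrhs : List.filter (fun x => decide (x ∉ res)) (fd (a :: M))
          = a :: (fd M).filter (fun x => decide (x ≠ a) && decide (x ∉ res)) := by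
        simp only [fd, List.filter_cons, List.filter_filter]
        simp [ha, Bool.and_comm]
      rw [hrhs, List.append_assoc, List.singleton_append]

theorem asignItems_eq_ld (items : List String) :
    asignItems items = ld (items.map (fstr items)) := by
  have h1 : asignItems items = (items.map (fstr items)).foldl stepA [] := by
    rw [List.foldl_map]; rfl
  rw [h1, foldl_stepA _ [] List.nodup_nil, List.nil_append]

theorem asignItems_alt_eq_ld (items : List String) :
    asignItems_alt items = ld (items.map (fstr items)) := by
  have hcnt : ∀ x : String,
      (items.foldl (fun d x => d.insert x (d.getD x 0 + 1)) PySem.Dict.empty).getD x 0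
        = ((PySem.List.count items x : Int)) := by
    intro x
    rw [PySem.Dict.foldl_insert_getD_add_one_eq_counter, PySem.Dict.getD_counter,
      PySem.List.count_eq]
  have h1 : asignItems_alt items
      = ((items.map (fstr items)).reverse.foldl stepB (PySem.Set.empty, [])).2.reverse := by
    unfold asignItems_alt
    rw [← List.map_reverse, List.foldl_map]
    simp only [fstr, stepB, hcnt]
  rw [h1, foldl_stepB _ PySem.Set.empty [] (by simp [PySem.Set.empty])]
  simp [fd_rev, List.reverse_reverse]

-- ===== VERDICT (by name: the statement is the Claim_ definition above) =====
theorem asignItems_spec : Claim_equal_asignItems := by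
  intro items _
  unfold Spec_asignItems
  rw [asignItems_eq_ld, asignItems_alt_eq_ld]
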